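-- pv_equiv track=rewrite | github.com/TsvetomirTerziyski/SoftUni-Sofware-Engineering | programming_fundamentals_with_python/functions_more_exercises/multiplication_sign.py | multiplication_result
-- ===== SOURCE A (Python) =====
-- def multiplication_result(lst):
--     counter = 0
--     if 0 in lst:
--         return 'zero'
--
--     for element in lst:
--         if element < 0:
--             counter += 1
--     if counter % 2 == 0:
--         return 'positive'
--     else:
--         return 'negative'
-- ===== SOURCE B (Python) =====
-- def _prod(lst):
--     n = len(lst)
--     if n == 0:
--         return 1
--     if n == 1:
--         return lst[0]
--     mid = n // 2
--     return _prod(lst[:mid]) * _prod(lst[mid:])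
--
--
-- def multiplication_result(lst):
--     p = _prod(lst)
--     if p > 0:
--         return 'positive'
--     if p < 0:
--         return 'negative'
--     return 'zero'
-- ===== Notes on version B (the rewrite author's own statement) =====
-- stated objective: alternative
-- what changed: B computes the actual product of the list by a divide-and-conquer (balanced halves) multiplication and classifies its sign, instead of A's zero-membership scan plus negative-count parity test; correct because the product is zero iff a zero occurs and otherwise its sign is (-1)^(#negatives).
import Mathlib
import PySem

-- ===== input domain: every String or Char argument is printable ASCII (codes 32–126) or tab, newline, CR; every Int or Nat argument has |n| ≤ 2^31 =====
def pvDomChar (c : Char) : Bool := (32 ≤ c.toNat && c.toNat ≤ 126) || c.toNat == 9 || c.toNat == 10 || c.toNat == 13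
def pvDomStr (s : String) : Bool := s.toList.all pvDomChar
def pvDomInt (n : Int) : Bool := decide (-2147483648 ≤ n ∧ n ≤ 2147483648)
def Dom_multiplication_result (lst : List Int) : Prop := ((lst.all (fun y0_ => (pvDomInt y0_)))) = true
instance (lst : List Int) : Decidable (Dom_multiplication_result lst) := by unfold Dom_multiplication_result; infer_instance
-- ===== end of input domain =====

-- B computes the actual product of the list by divide-and-conquer (balanced halves)
-- and classifies its sign, instead of A's zero scan + negative-count parity test.

-- ===== PORT A =====
def multiplication_result (lst : List Int) : String :=
  if lst.contains 0 then "zero"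
  else
    let counter : Int := lst.foldl (fun c e => if e < 0 then c + 1 else c) 0
    if counter % 2 == 0 then "positive" else "negative"

-- ===== PORT B =====
def mrProdDC (l : List Int) : Int :=
  match l with
  | [] => 1
  | [x] => x
  | x :: y :: rest =>
    let mid := (x :: y :: rest).length / 2
    mrProdDC ((x :: y :: rest).take mid) * mrProdDC ((x :: y :: rest).drop mid)
termination_by l.length
decreasing_by
  · simp; omega
  · simp; omega

def multiplication_result_alt (lst : List Int) : String :=
  let p : Int := mrProdDC lst
  if p > 0 then "positive"
  else if p < 0 then "negative"
  else "zero"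

-- ===== PRECONDITION & SPEC =====
def Spec_multiplication_result (lst : List Int) (out : String) : Prop := out = multiplication_result_alt lst
instance (lst : List Int) (out : String) : Decidable (Spec_multiplication_result lst out) := by unfold Spec_multiplication_result; infer_instance

-- ===== CLAIM (what is proved, stated in full; the proofs are below) =====
def Claim_equal_multiplication_result : Prop := ∀ (lst : List Int), Dom_multiplication_result lst → Spec_multiplication_result lst (multiplication_result lst)

-- ===== LEMMAS AND PROOFS =====

theorem mrProdDC_eq_prod (l : List Int) : mrProdDC l = l.prod := by
  fun_induction mrProdDC l with
  | case1 => rfl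
  | case2 x => simp
  | case3 x y rest mid ih1 ih2 =>
    simp only [ih1, ih2]
    rw [← List.prod_append, List.take_append_drop]


theorem mrProd_shift (lst : List Int) (c : Int) :
    lst.foldl (fun p e => p * e) c = c * lst.foldl (fun p e => p * e) 1 := by
  induction lst generalizing c with
  | nil => simp
  | cons x xs ih =>
    simp only [List.foldl_cons]
    rw [ih (c * x), ih (1 * x)]
    ring

theorem mrCount_shift (lst : List Int) (c : Int) :
    lst.foldl (fun c e => if e < 0 then c + 1 else c) c
      = c + lst.foldl (fun c e => if e < 0 then c + 1 else c) 0 := by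
  induction lst generalizing c with
  | nil => simp
  | cons x xs ih =>
    simp only [List.foldl_cons]
    rw [ih (if x < 0 then c + 1 else c), ih (if x < 0 then (0:Int) + 1 else 0)]
    split_ifs <;> ring

theorem mrFoldl_eq_prod (l : List Int) : l.foldl (fun p e => p * e) 1 = l.prod := by
  induction l with
  | nil => simp
  | cons x xs ih =>
    simp only [List.foldl_cons, List.prod_cons]
    rw [mrProd_shift xs (1 * x), ih]
    ring

-- sign of the product vs zero membership and negative-count parity
theorem mrSign (lst : List Int) :
    (¬ (0:Int) ∈ lst →
      ((0 < lst.foldl (fun p e => p * e) 1 ↔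
          (lst.foldl (fun c e => if e < 0 then c + 1 else c) (0:Int)) % 2 = 0) ∧
       lst.foldl (fun p e => p * e) 1 ≠ 0)) ∧
    ((0:Int) ∈ lst → lst.foldl (fun p e => p * e) 1 = 0) := by
  induction lst with
  | nil => simp
  | cons x xs ih =>
    obtain ⟨ihn, ihz⟩ := ih
    constructor
    · intro hnm
      have hx : x ≠ 0 := fun h => hnm (by simp [h])
      have hxs : ¬ (0:Int) ∈ xs := fun h => hnm (by simp [h])
      obtain ⟨hiff, hne⟩ := ihn hxs
      simp only [List.foldl_cons]
      rw [mrProd_shift xs (1 * x), mrCount_shift xs (if x < 0 then (0:Int) + 1 else 0)]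
      set P := xs.foldl (fun p e => p * e) 1 with hP
      set K : Int := xs.foldl (fun c e => if e < 0 then c + 1 else c) (0:Int) with hK
      constructor
      · by_cases hlt : x < 0
        · simp only [hlt, if_true, one_mul]
          constructor
          · intro hpos
            have hPneg : P < 0 := by
              rcases lt_trichotomy P 0 with h | h | h
              · exact h
              · exact absurd h hne
              · nlinarith
            have : ¬ K % 2 = 0 := fun h => absurd (hiff.mpr h) (by omega)
            omega
          · intro hpar
            have hKodd : K % 2 = 1 := by omega
            have hPneg : P < 0 := by
              rcases lt_trichotomy P 0 with h | h | h
              · exact h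
              · exact absurd h hne
              · have := hiff.mp h; omega
            nlinarith
        · have hxpos : 0 < x := by omega
          simp only [hlt, if_false, one_mul]
          constructor
          · intro hpos
            have hPpos : 0 < P := by nlinarith
            have := hiff.mp hPpos; omega
          · intro hpar
            have hPpos : 0 < P := hiff.mpr (by omega)
            nlinarith
      · by_cases hlt : x < 0 <;> simp only [one_mul]
        · intro h
          rcases mul_eq_zero.mp h with h | h
          · exact hx h
          · exact hne h
        · intro h
          rcases mul_eq_zero.mp h with h | h
          · exact hx h
          · exact hne h
    · intro hm
      simp only [List.foldl_cons]
      rw [mrProd_shift xs (1 * x)]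
      rcases List.mem_cons.mp hm with h | h
      · simp [← h]
      · rw [ihz h]; ring

-- ===== VERDICT (by name: the statement is the Claim_ definition above) =====
theorem multiplication_result_spec : Claim_equal_multiplication_result := by
  intro lst _
  unfold Spec_multiplication_result multiplication_result multiplication_result_alt
  rw [mrProdDC_eq_prod, ← mrFoldl_eq_prod]
  obtain ⟨hn, hz⟩ := mrSign lst
  by_cases hm : (0:Int) ∈ lst
  · have := hz hm
    simp [hm, this]
  · obtain ⟨hiff, hne⟩ := hn hm
    have hc : lst.contains 0 = false := by simpa using hm
    simp only [hc, Bool.false_eq_true, if_false]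
    split_ifs with h1 h2 h3 <;> first | (simp_all; omega) | simp_all
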